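-- pv_equiv track=rewrite | github.com/epeisach/py-toolpy | toolpy/tls_correct.py | sort_column_list
-- ===== SOURCE A (Python) =====
-- def sort_column(fp, k1, k2):
--     """Sort the columns of a list (fp); k1,k2 column position)"""
--
--     d1 = [[x[:k1], x[k1:k2], x[k2:]] for x in fp]  # separate 3 column
--     d1.sort(key=lambda y: y[1])  # sort 2th column
--
--     return d1
--
-- def sort_column_list(fp, k1, k2):
--     """Sort the columns of PDB file in order.
--     (input a list; k1,k2 column position)
--     """
--
--     fpnew, tmp = [], []
--     for n, ln in enumerate(fp):
--         if atom_record(ln):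
--             tmp.append(ln)
--             if n == len(fp) - 1:  # last one
--                 d1 = sort_column(tmp, k1, k2)
--                 fpnew.extend(d1)
--                 tmp = []
--
--         else:
--             if len(tmp) > 0:
--                 d1 = sort_column(tmp, k1, k2)
--                 fpnew.extend(d1)
--                 tmp = []
--
--     return fpnew
--
-- def atom_record(x):
--     val = 0
--     if "ATOM" in x[:4] or "HETA" in x[:4] or "ANISOU" in x[:6]:
--         val = 1
--
--     return val
-- ===== SOURCE B (Python) =====
-- def atom_record(x):
--     return x.startswith(("ATOM", "HETA", "ANISOU"))
--
--
-- def sort_column_list(fp, k1, k2):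
--     """Decorate-sort-undecorate: tag each atom line with its run number in one
--     pass, do ONE global stable sort keyed by (run, middle slice), then split
--     every line into its three columns.  Non-atom lines are never tagged, so
--     they are dropped; no per-run sort and no run buffering happen at all."""
--     keyed = []
--     run = 0
--     prev = False
--     for ln in fp:
--         cur = atom_record(ln)
--         if cur:
--             if not prev:
--                 run += 1
--             keyed.append((run, ln[k1:k2], ln))
--         prev = cur
--     keyed.sort(key=lambda t: (t[0], t[1]))
--     return [[ln[:k1], ln[k1:k2], ln[k2:]] for _, _, ln in keyed]
-- ===== Notes on version B (the rewrite author's own statement) =====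
-- stated objective: alternative
-- what changed: Instead of buffering each consecutive run of atom records and sorting it separately (with a last-line special case), B tags every atom line with its run number in one pass and does a single global stable sort keyed by (run number, middle slice), then splits each line into its three columns; no run is ever buffered or sorted on its own.
import Mathlib
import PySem

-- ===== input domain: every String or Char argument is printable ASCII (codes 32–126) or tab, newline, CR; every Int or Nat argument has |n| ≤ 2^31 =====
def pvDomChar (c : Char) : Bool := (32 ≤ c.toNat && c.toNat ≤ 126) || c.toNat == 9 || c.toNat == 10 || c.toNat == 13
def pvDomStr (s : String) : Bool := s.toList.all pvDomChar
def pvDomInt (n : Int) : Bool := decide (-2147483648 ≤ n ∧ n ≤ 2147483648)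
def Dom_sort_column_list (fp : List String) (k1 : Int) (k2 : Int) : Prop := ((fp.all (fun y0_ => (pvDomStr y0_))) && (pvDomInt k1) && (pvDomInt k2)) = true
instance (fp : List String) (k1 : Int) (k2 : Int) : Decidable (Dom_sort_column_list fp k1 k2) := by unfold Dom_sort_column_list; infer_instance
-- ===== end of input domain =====

-- B replaces A's per-run buffering and per-run sorts (with a last-line special case)
-- by one pass that tags each atom line with its run number followed by a single
-- global stable sort keyed by (run number, middle slice); objective: alternative.

-- ===== PORT A =====
-- atom_record(x): "ATOM" in x[:4] or "HETA" in x[:4] or "ANISOU" in x[:6]  → 1 else 0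
def atom_record (x : String) : Int :=
  if (PySem.Str.isIn "ATOM" (PySem.Str.slice x none (some 4))
      || PySem.Str.isIn "HETA" (PySem.Str.slice x none (some 4))
      || PySem.Str.isIn "ANISOU" (PySem.Str.slice x none (some 6))) = true
  then 1 else 0

-- sort_column(fp, k1, k2): split each line into 3 slices, stable-sort by the middle one
def sort_column (fp : List String) (k1 : Int) (k2 : Int) : List (List String) :=
  let d1 := fp.map (fun x =>
    [PySem.Str.slice x none (some k1), PySem.Str.slice x (some k1) (some k2),
     PySem.Str.slice x (some k2) none])
  PySem.List.sorted d1 (fun y => y.getD 1 "")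

-- the body of A's `for n, ln in enumerate(fp)` loop over the state (fpnew, tmp); L = len(fp)
def stepA (L : Int) (k1 : Int) (k2 : Int)
    (st : List (List String) × List String) (nl : Int × String) :
    List (List String) × List String :=
  if atom_record nl.2 ≠ 0 then
    let tmp := st.2 ++ [nl.2]
    if nl.1 = L - 1 then (st.1 ++ sort_column tmp k1 k2, [])
    else (st.1, tmp)
  else
    if st.2.length > 0 then (st.1 ++ sort_column st.2 k1 k2, [])
    else (st.1, st.2)

def sort_column_list (fp : List String) (k1 : Int) (k2 : Int) : List (List String) :=
  ((PySem.List.enumerate fp 0).foldl (stepA (fp.length : Int) k1 k2) ([], [])).1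

-- ===== PORT B =====
-- atom_record(x) in Source B: x.startswith(("ATOM", "HETA", "ANISOU"))
def atom_record_b (x : String) : Bool :=
  PySem.Str.startswith x "ATOM" || PySem.Str.startswith x "HETA"
    || PySem.Str.startswith x "ANISOU"

-- the body of Source B's tagging loop over the state (run, prev, keyed)
def stepB (k1 : Int) (k2 : Int)
    (st : Int × Bool × List (Int × String × String)) (ln : String) :
    Int × Bool × List (Int × String × String) :=
  if atom_record_b ln then
    let run := if st.2.1 then st.1 else st.1 + 1
    (run, true, st.2.2 ++ [(run, PySem.Str.slice ln (some k1) (some k2), ln)])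
  else (st.1, false, st.2.2)

-- keyed.sort(key=lambda t: (t[0], t[1])); then the undecorating comprehension
def sort_column_list_alt (fp : List String) (k1 : Int) (k2 : Int) : List (List String) :=
  let keyed := (fp.foldl (stepB k1 k2) (0, false, [])).2.2
  (PySem.List.sorted2 keyed (fun t => t.1) (fun t => t.2.1)).map
    (fun t => [PySem.Str.slice t.2.2 none (some k1),
               PySem.Str.slice t.2.2 (some k1) (some k2),
               PySem.Str.slice t.2.2 (some k2) none])

-- ===== PRECONDITION & SPEC =====
def Spec_sort_column_list (fp : List String) (k1 : Int) (k2 : Int) (out : List (List String)) : Prop := out = sort_column_list_alt fp k1 k2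
instance (fp : List String) (k1 : Int) (k2 : Int) (out : List (List String)) : Decidable (Spec_sort_column_list fp k1 k2 out) := by unfold Spec_sort_column_list; infer_instance

-- ===== CLAIM (what is proved, stated in full; the proofs are below) =====
def Claim_equal_sort_column_list : Prop := ∀ (fp : List String) (k1 : Int) (k2 : Int), Dom_sort_column_list fp k1 k2 → Spec_sort_column_list fp k1 k2 (sort_column_list fp k1 k2)

-- ===== LEMMAS AND PROOFS =====

-- ---- proof-side description of both programs: maximal atom runs ----

-- splitting a line into its three column slices
def triple (k1 k2 : Int) (ln : String) : List String :=
  [PySem.Str.slice ln none (some k1), PySem.Str.slice ln (some k1) (some k2),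
   PySem.Str.slice ln (some k2) none]

-- tagging a line with a run number and its middle slice (what Source B appends)
def decorate (k1 k2 : Int) (c : Int) (ln : String) : Int × String × String :=
  (c, PySem.Str.slice ln (some k1) (some k2), ln)

-- comparing raw lines by their middle slices
def midBef (k1 k2 : Int) : String → String → Bool :=
  fun a b => decide (PySem.Str.slice a (some k1) (some k2)
    < PySem.Str.slice b (some k1) (some k2))

-- one maximal atom run, split and stable-sorted by the middle slice (= A's sort_column)
def sort_run (run : List String) (k1 : Int) (k2 : Int) : List (List String) :=
  PySem.List.sorted (run.map (triple k1 k2)) (fun y => y.getD 1 "")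

-- reference run scan: skip a non-atom line, or sort the maximal atom run and recurse
def runScan (fp : List String) (k1 : Int) (k2 : Int) : List (List String) :=
  match fp with
  | [] => []
  | x :: xs =>
    if atom_record_b x then
      sort_run (x :: xs.takeWhile atom_record_b) k1 k2
        ++ runScan (xs.dropWhile atom_record_b) k1 k2
    else runScan xs k1 k2
termination_by fp.length
decreasing_by
  · exact Nat.lt_succ_of_le (List.length_dropWhile_le _ _)
  · simp

-- the decorated runs of fp with run numbers counted from r + 1 (what Source B's loop builds)
def decRuns (fp : List String) (k1 : Int) (k2 : Int) (r : Int) :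
    List (Int × String × String) :=
  match fp with
  | [] => []
  | x :: xs =>
    if atom_record_b x then
      (x :: xs.takeWhile atom_record_b).map (decorate k1 k2 (r + 1))
        ++ decRuns (xs.dropWhile atom_record_b) k1 k2 (r + 1)
    else decRuns xs k1 k2 r
termination_by fp.length
decreasing_by
  · exact Nat.lt_succ_of_le (List.length_dropWhile_le _ _)
  · simp

-- ---- generic facts about insertion sort (foldl insertBy) ----

-- inserting past a prefix it never goes before
theorem insertBy_append_left {α : Type} (before : α → α → Bool) (x : α)
    (pre acc : List α) (h : ∀ y ∈ pre, before x y = false) :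
    PySem.List.insertBy before x (pre ++ acc) = pre ++ PySem.List.insertBy before x acc := by
  induction pre with
  | nil => simp
  | cons y ys ih =>
    simp only [List.cons_append, PySem.List.insertBy, h y (by simp)]
    rw [ih (fun z hz => h z (by simp [hz]))]
    simp

-- a whole fold of insertions past such a prefix
theorem foldl_insertBy_append {α : Type} (before : α → α → Bool) (l pre acc : List α)
    (h : ∀ x ∈ l, ∀ y ∈ pre, before x y = false) :
    l.foldl (fun a x => PySem.List.insertBy before x a) (pre ++ acc)
      = pre ++ l.foldl (fun a x => PySem.List.insertBy before x a) acc := by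
  induction l generalizing acc with
  | nil => simp
  | cons x xs ih =>
    simp only [List.foldl_cons]
    rw [insertBy_append_left before x pre acc (h x (by simp)),
      ih _ (fun z hz => h z (by simp [hz]))]

-- insertBy only depends on `before` restricted to the elements involved
theorem insertBy_congr {α : Type} (b₁ b₂ : α → α → Bool) (p : α → Prop)
    (hb : ∀ a c, p a → p c → b₁ a c = b₂ a c) (x : α) (acc : List α)
    (hx : p x) (hacc : ∀ y ∈ acc, p y) :
    PySem.List.insertBy b₁ x acc = PySem.List.insertBy b₂ x acc := by
  induction acc with
  | nil => rfl
  | cons y ys ih =>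
    simp only [PySem.List.insertBy, hb x y hx (hacc y (by simp))]
    rw [ih (fun z hz => hacc z (by simp [hz]))]

theorem foldl_insertBy_congr {α : Type} (b₁ b₂ : α → α → Bool) (p : α → Prop)
    (hb : ∀ a c, p a → p c → b₁ a c = b₂ a c) (l acc : List α)
    (hl : ∀ x ∈ l, p x) (hacc : ∀ y ∈ acc, p y) :
    l.foldl (fun a x => PySem.List.insertBy b₁ x a) acc
      = l.foldl (fun a x => PySem.List.insertBy b₂ x a) acc := by
  induction l generalizing acc with
  | nil => rfl
  | cons x xs ih =>
    simp only [List.foldl_cons]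
    rw [insertBy_congr b₁ b₂ p hb x acc (hl x (by simp)) hacc]
    exact ih (PySem.List.insertBy b₂ x acc) (fun z hz => hl z (by simp [hz]))
      (fun y hy => ((PySem.List.mem_insertBy b₂ x y acc).mp hy).elim
        (fun h => h ▸ hl x (by simp)) (hacc y))

-- insertion sort commutes with map when the orders correspond along f
theorem map_insertBy {α β : Type} (f : α → β) (bef : α → α → Bool) (bef' : β → β → Bool)
    (hb : ∀ a c, bef a c = bef' (f a) (f c)) (x : α) (l : List α) :
    (PySem.List.insertBy bef x l).map f
      = PySem.List.insertBy bef' (f x) (l.map f) := by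
  induction l with
  | nil => rfl
  | cons y ys ih =>
    simp only [PySem.List.insertBy, hb x y, List.map_cons]
    by_cases h : bef' (f x) (f y) = true
    · simp [h]
    · simp only [Bool.not_eq_true] at h
      simp [h, ih]

theorem map_foldl_insertBy {α β : Type} (f : α → β) (bef : α → α → Bool)
    (bef' : β → β → Bool) (hb : ∀ a c, bef a c = bef' (f a) (f c))
    (l acc : List α) :
    (l.foldl (fun a x => PySem.List.insertBy bef x a) acc).map f
      = (l.map f).foldl (fun a x => PySem.List.insertBy bef' x a) (acc.map f) := by
  induction l generalizing acc with
  | nil => rfl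
  | cons x xs ih =>
    simp only [List.foldl_cons, List.map_cons]
    rw [ih, map_insertBy f bef bef' hb]

-- ---- the lexicographic comparison Source B's tuple key induces ----

def befT : (Int × String × String) → (Int × String × String) → Bool :=
  fun a b => decide (a.1 < b.1) || !decide (b.1 < a.1) && decide (a.2.1 < b.2.1)

theorem sorted2_eq_foldl (xs : List (Int × String × String)) :
    PySem.List.sorted2 xs (fun t => t.1) (fun t => t.2.1)
      = xs.foldl (fun a x => PySem.List.insertBy befT x a) [] := rfl

-- sorted2 splits at a strict jump of the first key component
theorem sorted2_append (l1 l2 : List (Int × String × String))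
    (h : ∀ x ∈ l1, ∀ y ∈ l2, x.1 < y.1) :
    PySem.List.sorted2 (l1 ++ l2) (fun t => t.1) (fun t => t.2.1)
      = PySem.List.sorted2 l1 (fun t => t.1) (fun t => t.2.1)
        ++ PySem.List.sorted2 l2 (fun t => t.1) (fun t => t.2.1) := by
  have h2 : ∀ x ∈ l2, ∀ y ∈ PySem.List.sorted2 l1 (fun t => t.1) (fun t => t.2.1),
      befT x y = false := by
    intro x hx y hy
    have hy1 : y ∈ l1 :=
      (PySem.List.sorted2_perm l1 (fun t => t.1) (fun t => t.2.1) false).mem_iff.mp hy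
    have hlt : y.1 < x.1 := h y hy1 x hx
    simp only [befT, Bool.or_eq_false_iff, decide_eq_false_iff_not, not_lt,
      Bool.and_eq_false_iff, Bool.not_eq_false', decide_eq_true_iff]
    exact ⟨le_of_lt hlt, Or.inl hlt⟩
  calc PySem.List.sorted2 (l1 ++ l2) (fun t => t.1) (fun t => t.2.1)
      = l2.foldl (fun a x => PySem.List.insertBy befT x a)
          (PySem.List.sorted2 l1 (fun t => t.1) (fun t => t.2.1) ++ []) := by
        rw [sorted2_eq_foldl, List.foldl_append, List.append_nil]; rfl
    _ = PySem.List.sorted2 l1 (fun t => t.1) (fun t => t.2.1)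
          ++ l2.foldl (fun a x => PySem.List.insertBy befT x a) [] :=
        foldl_insertBy_append befT l2 _ [] h2
    _ = PySem.List.sorted2 l1 (fun t => t.1) (fun t => t.2.1)
          ++ PySem.List.sorted2 l2 (fun t => t.1) (fun t => t.2.1) := by
        rw [sorted2_eq_foldl l2]

-- on a block with constant first component sorted2 is the plain sort by the middle slice
theorem sorted2_const_fst (c : Int) (l : List (Int × String × String))
    (h : ∀ x ∈ l, x.1 = c) :
    PySem.List.sorted2 l (fun t => t.1) (fun t => t.2.1)
      = PySem.List.sorted l (fun t => t.2.1) := by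
  rw [sorted2_eq_foldl, PySem.List.sorted_eq_foldl_insertBy]
  exact foldl_insertBy_congr befT _ (fun t => t.1 = c)
    (fun a b ha hb => by simp [befT, ha, hb]) l [] h (by simp)

-- ---- Source B's tagging loop builds exactly decRuns ----

theorem stepB_foldl (k1 k2 : Int) :
    ∀ (fp : List String) (r : Int) (b : Bool) (kacc : List (Int × String × String)),
      ((fp.foldl (stepB k1 k2) (r, b, kacc)).2.2 : List (Int × String × String))
        = kacc ++ (if b then
            (fp.takeWhile atom_record_b).map (decorate k1 k2 r)
              ++ decRuns (fp.dropWhile atom_record_b) k1 k2 r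
          else decRuns fp k1 k2 r) := by
  intro fp
  induction fp with
  | nil => intro r b kacc; cases b <;> simp [decRuns]
  | cons x xs ih =>
    intro r b kacc
    by_cases hx : atom_record_b x
    · cases b with
      | true =>
        have hstep : stepB k1 k2 (r, true, kacc) x
            = (r, true, kacc ++ [decorate k1 k2 r x]) := by
          simp [stepB, hx, decorate]
        simp only [List.foldl_cons, hstep, ih, List.takeWhile_cons_of_pos hx,
          List.dropWhile_cons_of_pos hx, if_pos, List.map_cons]
        simp
      | false =>
        have hstep : stepB k1 k2 (r, false, kacc) x
            = (r + 1, true, kacc ++ [decorate k1 k2 (r + 1) x]) := by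
          simp [stepB, hx, decorate]
        simp only [List.foldl_cons, hstep, ih]
        rw [show decRuns (x :: xs) k1 k2 r
            = (x :: xs.takeWhile atom_record_b).map (decorate k1 k2 (r + 1))
                ++ decRuns (xs.dropWhile atom_record_b) k1 k2 (r + 1) by
          rw [decRuns]; simp [hx]]
        simp
    · have hstep : ∀ b, stepB k1 k2 (r, b, kacc) x = (r, false, kacc) := by
        intro b; simp [stepB, hx]
      have hxs : decRuns (x :: xs) k1 k2 r = decRuns xs k1 k2 r := by
        rw [decRuns]; simp [hx]
      cases b with
      | true =>
        simp only [List.foldl_cons, hstep, ih,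
          List.takeWhile_cons_of_neg (by simpa using hx),
          List.dropWhile_cons_of_neg (by simpa using hx)]
        simp [hxs]
      | false =>
        simp only [List.foldl_cons, hstep, ih]
        simp [hxs]

-- run numbers in decRuns fp r are at least r + 1
theorem decRuns_fst_ge (k1 k2 : Int) (fp : List String) (r : Int) :
    ∀ t ∈ decRuns fp k1 k2 r, r + 1 ≤ t.1 := by
  induction fp, r using decRuns.induct with
  | case1 r => simp [decRuns]
  | case2 r x xs hx ih =>
    intro t ht
    rw [show decRuns (x :: xs) k1 k2 r
        = (x :: xs.takeWhile atom_record_b).map (decorate k1 k2 (r + 1))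
            ++ decRuns (xs.dropWhile atom_record_b) k1 k2 (r + 1) by
      rw [decRuns]; simp [hx]] at ht
    rcases List.mem_append.mp ht with h | h
    · rcases List.mem_map.mp h with ⟨ln, _, rfl⟩
      simp [decorate]
    · have := ih t h; omega
  | case3 r x xs hx ih =>
    intro t ht
    rw [show decRuns (x :: xs) k1 k2 r = decRuns xs k1 k2 r by
      rw [decRuns]; simp [hx]] at ht
    exact ih t ht

-- ---- undecorating the global sort gives the run scan ----

-- sort_run is the sort of the raw run by middle slice, then splitting
theorem sort_run_eq (run : List String) (k1 k2 : Int) :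
    sort_run run k1 k2
      = (run.foldl (fun a x => PySem.List.insertBy (midBef k1 k2) x a) []).map
          (triple k1 k2) := by
  unfold sort_run
  rw [PySem.List.sorted_eq_foldl_insertBy,
    map_foldl_insertBy (triple k1 k2) (midBef k1 k2)
      (fun y z => decide ((y.getD 1 "") < (z.getD 1 ""))) (fun a c => rfl) run []]
  rfl

-- a decorated block, sorted by the middle slice and undecorated, is sort_run
theorem block_sorted (run : List String) (k1 k2 c : Int) :
    (PySem.List.sorted (run.map (decorate k1 k2 c)) (fun t => t.2.1)).map
      (fun t => [PySem.Str.slice t.2.2 none (some k1),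
                 PySem.Str.slice t.2.2 (some k1) (some k2),
                 PySem.Str.slice t.2.2 (some k2) none])
      = sort_run run k1 k2 := by
  have hmf := map_foldl_insertBy (decorate k1 k2 c) (midBef k1 k2)
    (fun t u : Int × String × String => decide (t.2.1 < u.2.1)) (fun a b => rfl) run []
  simp only [List.map_nil] at hmf
  rw [PySem.List.sorted_eq_foldl_insertBy, ← hmf, List.map_map, sort_run_eq]
  rfl

-- sorted2 of decRuns, undecorated, is the run scan
theorem sorted2_decRuns (k1 k2 : Int) (fp : List String) (r : Int) :
    (PySem.List.sorted2 (decRuns fp k1 k2 r) (fun t => t.1) (fun t => t.2.1)).map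
      (fun t => [PySem.Str.slice t.2.2 none (some k1),
                 PySem.Str.slice t.2.2 (some k1) (some k2),
                 PySem.Str.slice t.2.2 (some k2) none])
      = runScan fp k1 k2 := by
  induction fp, r using decRuns.induct with
  | case1 r => simp [decRuns, runScan, sorted2_eq_foldl]
  | case2 r x xs hx ih =>
    rw [show decRuns (x :: xs) k1 k2 r
        = (x :: xs.takeWhile atom_record_b).map (decorate k1 k2 (r + 1))
            ++ decRuns (xs.dropWhile atom_record_b) k1 k2 (r + 1) by
      rw [decRuns]; simp [hx]]
    rw [sorted2_append _ _ (by
      intro a ha b hb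
      rcases List.mem_map.mp ha with ⟨ln, _, rfl⟩
      have := decRuns_fst_ge k1 k2 (xs.dropWhile atom_record_b) (r + 1) b hb
      simp only [decorate]
      omega)]
    rw [List.map_append,
      sorted2_const_fst (r + 1) _ (by
        intro a ha
        rcases List.mem_map.mp ha with ⟨ln, _, rfl⟩
        simp [decorate]),
      block_sorted, ih]
    rw [show runScan (x :: xs) k1 k2
        = sort_run (x :: xs.takeWhile atom_record_b) k1 k2
            ++ runScan (xs.dropWhile atom_record_b) k1 k2 by
      rw [runScan]; simp [hx]]
  | case3 r x xs hx ih =>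
    rw [show decRuns (x :: xs) k1 k2 r = decRuns xs k1 k2 r by
      rw [decRuns]; simp [hx]]
    rw [ih]
    rw [show runScan (x :: xs) k1 k2 = runScan xs k1 k2 by
      rw [runScan]; simp [hx]]

-- ---- A's loop equals the run scan (invariant of stepA) ----

theorem sort_column_eq_sort_run (l : List String) (k1 k2 : Int) :
    sort_column l k1 k2 = sort_run l k1 k2 := rfl

theorem sort_run_nil (k1 k2 : Int) : sort_run [] k1 k2 = [] := rfl

-- a pattern is an infix of take pat.length s iff it is a prefix of s
theorem infix_take_iff_prefix {α : Type} (p s : List α) :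
    p <:+: s.take p.length ↔ p <+: s := by
  constructor
  · rintro ⟨l, r, h⟩
    have hlen := congrArg List.length h
    rw [List.length_append, List.length_append, List.length_take] at hlen
    have hmin : min p.length s.length ≤ p.length := Nat.min_le_left _ _
    have hl : l.length = 0 := by omega
    have hr : r.length = 0 := by omega
    rw [List.length_eq_zero_iff] at hl hr
    subst hl; subst hr
    simp only [List.nil_append, List.append_nil] at h
    rw [h]; exact List.take_prefix _ _
  · intro h
    rw [List.prefix_iff_eq_take] at h
    rw [← h]

-- `pat in x[:len(pat)]` is `x.startswith(pat)`
theorem isIn_slice_eq_startswith (p x : String) (k : Int) (h0 : 0 ≤ k)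
    (hl : p.toList.length = k.toNat) :
    PySem.Str.isIn p (PySem.Str.slice x none (some k)) = PySem.Str.startswith x p := by
  simp only [pysem]
  rw [Bool.eq_iff_iff, PySem.Chars.isIn_iff_infix, PySem.Chars.startswith_iff,
    PySem.List.slice_to x.toList h0, ← hl]
  exact infix_take_iff_prefix _ _

-- A's truthiness test agrees with B's startswith test
theorem atom_eq (x : String) : (atom_record x ≠ 0) ↔ atom_record_b x = true := by
  unfold atom_record atom_record_b
  rw [isIn_slice_eq_startswith "ATOM" x 4 (by norm_num) (by decide),
    isIn_slice_eq_startswith "HETA" x 4 (by norm_num) (by decide),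
    isIn_slice_eq_startswith "ANISOU" x 6 (by norm_num) (by decide)]
  split_ifs with h
  · simpa using h
  · simpa using h

-- runScan flushes the (possibly empty) leading atom run
theorem runScan_flush (l : List String) (k1 k2 : Int) :
    runScan l k1 k2 =
      sort_run (l.takeWhile atom_record_b) k1 k2
        ++ runScan (l.dropWhile atom_record_b) k1 k2 := by
  cases l with
  | nil => simp [runScan, sort_run_nil]
  | cons x xs =>
    by_cases hx : atom_record_b x
    · conv_lhs => rw [runScan]
      rw [List.takeWhile_cons_of_pos hx, List.dropWhile_cons_of_pos hx]
      simp [hx]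
    · rw [List.takeWhile_cons_of_neg (by simpa using hx),
        List.dropWhile_cons_of_neg (by simpa using hx), sort_run_nil]
      simp

-- the invariant of A's loop: with a pending atom run `tmp` and the last index at L - 1,
-- the loop emits the sorted completed run and then behaves like runScan on the remainder
theorem loopA_eq (k1 k2 L : Int) (rest : List String) :
    ∀ (i : Int) (acc : List (List String)) (tmp : List String),
      rest ≠ [] → i + (rest.length : Int) = L →
      ((PySem.List.enumerate rest i).foldl (stepA L k1 k2) (acc, tmp)).1
        = acc ++ sort_run (tmp ++ rest.takeWhile atom_record_b) k1 k2
            ++ runScan (rest.dropWhile atom_record_b) k1 k2 := by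
  induction rest with
  | nil => intro _ _ _ h _; exact absurd rfl h
  | cons x rest' ih =>
    intro i acc tmp _ hL
    rw [PySem.List.enumerate_cons, List.foldl_cons]
    by_cases hx : atom_record_b x
    · have hxa : atom_record x ≠ 0 := (atom_eq x).mpr hx
      rw [List.takeWhile_cons_of_pos hx, List.dropWhile_cons_of_pos hx]
      cases rest' with
      | nil =>
        have hi : i = L - 1 := by simp at hL; omega
        have hstep : stepA L k1 k2 (acc, tmp) (i, x)
            = (acc ++ sort_column (tmp ++ [x]) k1 k2, []) := by
          simp [stepA, hxa, hi]
        rw [hstep, PySem.List.enumerate_nil, List.foldl_nil]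
        simp [sort_column_eq_sort_run, runScan]
      | cons y rest'' =>
        have hi : ¬ i = L - 1 := by
          simp only [List.length_cons] at hL; push_cast at hL; omega
        have hstep : stepA L k1 k2 (acc, tmp) (i, x) = (acc, tmp ++ [x]) := by
          simp [stepA, hxa, hi]
        rw [hstep, ih (i + 1) acc (tmp ++ [x]) (List.cons_ne_nil y rest'') (by
          simp only [List.length_cons] at hL ⊢; push_cast at hL ⊢; omega)]
        simp [List.append_assoc]
    · have hxa : ¬ atom_record x ≠ 0 := fun h => hx ((atom_eq x).mp h)
      rw [List.takeWhile_cons_of_neg (by simpa using hx),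
        List.dropWhile_cons_of_neg (by simpa using hx)]
      have haltx : runScan (x :: rest') k1 k2 = runScan rest' k1 k2 := by
        rw [runScan]; simp [hx]
      by_cases htmp : tmp.length > 0
      · have hstep : stepA L k1 k2 (acc, tmp) (i, x)
            = (acc ++ sort_column tmp k1 k2, []) := by
          simp [stepA, hxa, htmp]
        rw [hstep]
        cases rest' with
        | nil =>
          rw [PySem.List.enumerate_nil, List.foldl_nil, haltx]
          simp [sort_column_eq_sort_run, runScan]
        | cons y rest'' =>
          rw [ih (i + 1) (acc ++ sort_column tmp k1 k2) [] (List.cons_ne_nil y rest'') (by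
            simp only [List.length_cons] at hL ⊢; push_cast at hL ⊢; omega)]
          rw [haltx, runScan_flush (y :: rest'') k1 k2]
          simp [sort_column_eq_sort_run, List.append_assoc]
      · have htmp0 : tmp = [] := by
          rw [← List.length_eq_zero_iff]; omega
        subst htmp0
        have hstep : stepA L k1 k2 (acc, []) (i, x) = (acc, []) := by
          simp [stepA, hxa]
        rw [hstep]
        cases rest' with
        | nil =>
          rw [PySem.List.enumerate_nil, List.foldl_nil, haltx]
          simp [sort_run_nil, runScan]
        | cons y rest'' =>
          rw [ih (i + 1) acc [] (List.cons_ne_nil y rest'') (by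
            simp only [List.length_cons] at hL ⊢; push_cast at hL ⊢; omega)]
          rw [haltx, runScan_flush (y :: rest'') k1 k2]
          simp [sort_run_nil]

-- ===== VERDICT (by name: the statement is the Claim_ definition above) =====
theorem sort_column_list_spec : Claim_equal_sort_column_list := by
  intro fp k1 k2 _
  unfold Spec_sort_column_list
  have hA : sort_column_list fp k1 k2 = runScan fp k1 k2 := by
    unfold sort_column_list
    cases fp with
    | nil => simp [PySem.List.enumerate_nil, runScan]
    | cons x xs =>
      rw [loopA_eq k1 k2 ((x :: xs).length : Int) (x :: xs) 0 [] []
        (List.cons_ne_nil x xs) (by ring)]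
      rw [runScan_flush (x :: xs) k1 k2]
      simp
  have hB : sort_column_list_alt fp k1 k2 = runScan fp k1 k2 := by
    unfold sort_column_list_alt
    rw [show ((fp.foldl (stepB k1 k2) (0, false, [])).2.2 : List (Int × String × String))
        = decRuns fp k1 k2 0 from by
      rw [stepB_foldl k1 k2 fp 0 false []]; simp]
    exact sorted2_decRuns k1 k2 fp 0
  rw [hA, hB]
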